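-- pv_equiv track=rewrite | github.com/SplashTheBatya/ZapryagVSU | SpecialConverter.py | gray_code_to_dec_changer
-- ===== SOURCE A (Python) =====
-- def bin_to_dec_changer(bin: str):
--     exponent = len(bin) - 1
--     dec_result = 0
--     for iter in bin:
--         dec_result += (2 ** exponent) * int(iter)
--         exponent -= 1
--
--     return str(dec_result)
--
-- def gray_code_to_dec_changer(gray_num: str):
--     gray_arr = [x for x in gray_num]
--     bin_num_arr = [gray_arr[0]]
--     for iter in range(1, len(gray_arr)):
--         if int(gray_arr[iter]) + int(bin_num_arr[iter - 1]) == 2: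
--             bin_num_arr.append('0')
--         else:
--             bin_num_arr.append(str(int(gray_arr[iter]) + int(bin_num_arr[iter - 1])))
--
--     bin_res = ''
--     for iter in bin_num_arr:
--         bin_res += iter
--
--     return bin_to_dec_changer(bin_res)
-- ===== SOURCE B (Python) =====
-- def gray_code_to_dec_changer(gray_num: str):
--     # Single fused pass: decode each Gray bit to the running binary bit and
--     # fold it straight into a Horner accumulator, instead of building a list,
--     # joining it into a string and summing int(char) * 2**exponent.
--     bit = int(gray_num[0])
--     dec = bit
--     for g in gray_num[1:]:
--         s = int(g) + bit
--         bit = 0 if s == 2 else s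
--         dec = 2 * dec + bit
--     return str(dec)
-- ===== Notes on version B (the rewrite author's own statement) =====
-- stated objective: simpler
-- what changed: A decodes into a list, re-parses each stored decimal string with int(), joins the list into a string and sums int(char)*2**exponent per character; B is one fused left-to-right pass with a Horner accumulator (dec = 2*dec + bit), no list, no joined string, no powers. Pre_ excludes strings containing characters other than the two binary digits (the natural Gray-code domain): on other digit strings the decoded positions are not bits and A's value comes from concatenating their multi-digit decimal renderings, an artefact of the string pipeline.
-- outside the precondition, e.g. on gray_code_to_dec_changer('99'): A returns '46', B returns '36'
import Mathlib
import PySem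

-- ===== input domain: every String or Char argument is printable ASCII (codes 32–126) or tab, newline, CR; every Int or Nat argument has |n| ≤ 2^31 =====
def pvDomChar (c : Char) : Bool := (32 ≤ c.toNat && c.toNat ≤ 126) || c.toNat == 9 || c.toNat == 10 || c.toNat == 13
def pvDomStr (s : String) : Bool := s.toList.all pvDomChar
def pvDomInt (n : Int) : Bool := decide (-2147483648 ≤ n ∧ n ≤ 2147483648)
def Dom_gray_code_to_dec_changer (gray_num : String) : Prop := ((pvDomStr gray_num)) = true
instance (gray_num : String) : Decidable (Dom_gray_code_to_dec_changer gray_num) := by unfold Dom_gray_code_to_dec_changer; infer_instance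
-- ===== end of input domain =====

-- B fuses A's three passes (decode into a list, join to a string, powers-of-two sum)
-- into one left-to-right Horner pass; equal on every nonempty binary string.

-- ===== PORT A =====
-- int(x) on the one-character / decimal-digit strings this program feeds it,
-- ported by hand (exact there: such a string is nonempty, unsigned, unpadded
-- digits, which int() reads as the decimal value; under Pre_ no other string
-- reaches an int() call):
def pvDigitVal (c : Char) : Int := (c.toNat : Int) - 48
def pvDecToInt (cs : List Char) : Int := cs.foldl (fun a c => 10 * a + pvDigitVal c) 0

-- helper bin_to_dec_changer: the Python helper's str argument is carried as its
-- list of characters (the entry point hands it a string it built char by char).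
-- 2 ** exponent: exponent starts at len-1 and decreases once per character, so it
-- is ≥ 0 at every iteration; Nat exponent via .toNat is exact.
def bin_to_dec_changer (bin : List Char) : String :=
  let exponent : Int := PySem.List.len bin - 1
  let st := bin.foldl (fun (st : Int × Int) c =>
      (st.1 + 2 ^ st.2.toNat * pvDigitVal c, st.2 - 1)) (0, exponent)
  PySem.Int.toStr st.1

-- the loop body of A's for-loop over range(1, len(gray_arr)) (named so the proofs
-- can speak about it; it is exactly the Python body, Python's sum computed once)
def pvAStep (gray_arr : List Char) (acc : List (List Char)) (i : Int) : List (List Char) :=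
  let s : Int := pvDigitVal (PySem.List.pyGetD gray_arr i ' ')
                  + pvDecToInt (PySem.List.pyGetD acc (i - 1) [])
  if s = 2 then acc ++ [['0']] else acc ++ [PySem.Int.toChars s]

def gray_code_to_dec_changer (gray_num : String) : String :=
  let gray_arr : List Char := gray_num.toList
  let bin_num_arr : List (List Char) :=
    (PySem.List.pyRange 1 (PySem.List.len gray_arr) 1).foldl
      (pvAStep gray_arr) [[PySem.List.pyGetD gray_arr 0 ' ']]
  let bin_res : List Char := bin_num_arr.foldl (fun s t => s ++ t) []
  bin_to_dec_changer bin_res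

-- ===== PORT B =====
def gray_code_to_dec_changer_alt (gray_num : String) : String :=
  match gray_num.toList with
  | [] => ""   -- Python B raises IndexError on an empty string (excluded by Pre_)
  | c :: rest =>
    let st := rest.foldl
      (fun (st : Int × Int) g =>
        let s := pvDigitVal g + st.1
        let bit := if s = 2 then 0 else s
        (bit, 2 * st.2 + bit))
      (pvDigitVal c, pvDigitVal c)
    PySem.Int.toStr st.2

-- ===== PRECONDITION & SPEC =====
-- Pre_: the function's natural domain, nonempty binary (Gray-code) strings.
-- It excludes (a) inputs on which A raises (empty string: IndexError; any
-- non-digit character: ValueError at an int() call) and (b) digit strings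
-- containing 2–9, on which A still returns: there the decoded positions are
-- not bits and A's value is an artefact of concatenating their multi-digit
-- decimal renderings and re-reading the concatenation as binary.
def Pre_gray_code_to_dec_changer (gray_num : String) : Prop :=
  gray_num.toList ≠ [] ∧ gray_num.toList.all (fun c => c = '0' || c = '1') = true
instance (gray_num : String) : Decidable (Pre_gray_code_to_dec_changer gray_num) := by
  unfold Pre_gray_code_to_dec_changer; infer_instance

def pvWitness_gray_code_to_dec_changer : String := "101"

def Spec_gray_code_to_dec_changer (gray_num : String) (out : String) : Prop :=
  out = gray_code_to_dec_changer_alt gray_num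
instance (gray_num : String) (out : String) : Decidable (Spec_gray_code_to_dec_changer gray_num out) := by
  unfold Spec_gray_code_to_dec_changer; infer_instance

-- ===== CLAIM (what is proved, stated in full; the proofs are below) =====
def Claim_equal_gray_code_to_dec_changer : Prop := ∀ (gray_num : String), Dom_gray_code_to_dec_changer gray_num → Pre_gray_code_to_dec_changer gray_num → Spec_gray_code_to_dec_changer gray_num (gray_code_to_dec_changer gray_num)

-- ===== LEMMAS AND PROOFS =====

-- the Gray decoding step and its iterate (proof-side reference semantics)
def pvNb (bit : Int) (g : Char) : Int :=
  if pvDigitVal g + bit = 2 then 0 else pvDigitVal g + bit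
def pvVs (bit : Int) : List Char → List Int
  | [] => []
  | g :: t => pvNb bit g :: pvVs (pvNb bit g) t
def pvBitAfter (bit : Int) (gs : List Char) : Int := gs.foldl pvNb bit

theorem pvBitAfter_append (b : Int) (xs : List Char) (g : Char) :
    pvBitAfter b (xs ++ [g]) = pvNb (pvBitAfter b xs) g := by
  simp [pvBitAfter]

theorem pvVs_append (b : Int) (xs : List Char) (g : Char) :
    pvVs b (xs ++ [g]) = pvVs b xs ++ [pvNb (pvBitAfter b xs) g] := by
  induction xs generalizing b with
  | nil => simp [pvVs, pvBitAfter]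
  | cons x t ih => simp [pvVs, ih, pvBitAfter]

theorem pvVs_length (b : Int) (xs : List Char) : (pvVs b xs).length = xs.length := by
  induction xs generalizing b with
  | nil => rfl
  | cons x t ih => simp [pvVs, ih]

theorem pvNb_bit (b : Int) (g : Char) (hb : b = 0 ∨ b = 1) (hg : g = '0' ∨ g = '1') :
    pvNb b g = 0 ∨ pvNb b g = 1 := by
  unfold pvNb pvDigitVal
  rcases hg with h | h <;> subst h <;> rcases hb with h | h <;> subst h <;> simp

theorem pvBitAfter_bit (b : Int) (xs : List Char) (hb : b = 0 ∨ b = 1)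
    (hxs : ∀ c ∈ xs, c = '0' ∨ c = '1') : pvBitAfter b xs = 0 ∨ pvBitAfter b xs = 1 := by
  induction xs generalizing b with
  | nil => exact hb
  | cons x t ih =>
      have := pvNb_bit b x hb (hxs x (by simp))
      simpa [pvBitAfter] using ih (pvNb b x) this (fun c hc => hxs c (by simp [hc]))

theorem pvDecToInt_bit (v : Int) (h : v = 0 ∨ v = 1) :
    pvDecToInt (PySem.Int.toChars v) = v := by
  rcases h with h | h <;> subst h <;> decide

-- ---- A's first loop builds [gray₀] :: decoded values rendered with str() ----
theorem pvAStep_congr (pre : List Char) (y : Char) (acc : List (List Char)) (i : Int)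
    (h1 : 1 ≤ i) (h2 : i < (pre.length : Int)) :
    pvAStep (pre ++ [y]) acc i = pvAStep pre acc i := by
  have hg : PySem.List.pyGetD (pre ++ [y]) i ' ' = PySem.List.pyGetD pre i ' ' := by
    rw [PySem.List.pyGetD_eq_getElem (pre ++ [y]) ' ' (by omega) (by simp; omega),
        PySem.List.pyGetD_eq_getElem pre ' ' (by omega) h2,
        List.getElem_append_left]
  unfold pvAStep
  rw [hg]

theorem pvA_array (rest : List Char) (c : Char)
    (hc : c = '0' ∨ c = '1')
    (hrest : ∀ g ∈ rest, g = '0' ∨ g = '1') :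
    (PySem.List.pyRange 1 ((c :: rest).length : Int)).foldl (pvAStep (c :: rest)) [[c]]
      = [c] :: (pvVs (pvDigitVal c) rest).map PySem.Int.toChars := by
  induction rest using List.reverseRecOn with
  | nil =>
      rw [show (((c :: ([] : List Char)).length : Nat) : Int) = 1 by simp,
        PySem.List.pyRange_one_eq_nil (by norm_num)]
      simp [pvVs]
  | append_singleton ys y ih =>
      have hys : ∀ g ∈ ys, g = '0' ∨ g = '1' :=
        fun g hg => hrest g (by simp [hg])
      have hb : pvDigitVal c = 0 ∨ pvDigitVal c = 1 := by
        rcases hc with h | h <;> subst h <;> simp [pvDigitVal]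
      have hba := pvBitAfter_bit (pvDigitVal c) ys hb hys
      have hlen : (((c :: (ys ++ [y])).length : Nat) : Int) = ((ys.length + 1 : Nat) : Int) + 1 := by
        simp
      have hinner : List.foldl (pvAStep (c :: (ys ++ [y]))) [[c]]
          (PySem.List.pyRange 1 ((ys.length + 1 : Nat) : Int))
          = [c] :: (pvVs (pvDigitVal c) ys).map PySem.Int.toChars := by
        rw [PySem.List.foldl_congr_mem _ _ (pvAStep (c :: ys)) _
          (by
            intro acc x hx
            rw [PySem.List.mem_pyRange_one] at hx
            rw [show (c :: (ys ++ [y])) = (c :: ys) ++ [y] by simp]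
            exact pvAStep_congr (c :: ys) y acc x hx.1 (by simp; push_cast at hx ⊢; omega))]
        have ih' := ih hys
        rw [show (((c :: ys).length : Nat) : Int) = ((ys.length + 1 : Nat) : Int) by simp] at ih'
        exact ih'
      rw [hlen, PySem.List.pyRange_one_succ_right (by push_cast; omega), List.foldl_append,
        hinner, List.foldl_cons, List.foldl_nil]
      -- the final iteration
      have hgray : PySem.List.pyGetD (c :: (ys ++ [y])) ((ys.length + 1 : Nat) : Int) ' ' = y := by
        rw [PySem.List.pyGetD_natCast, show (c :: (ys ++ [y])) = (c :: ys) ++ [y] by simp]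
        have h : ((c :: ys) ++ [y]).getD (c :: ys).length ' ' = y := by
          simp [List.getD_eq_getElem?_getD]
        simp only [List.length_cons, List.cons_append] at h ⊢
        exact h
      have hidx : ((ys.length + 1 : Nat) : Int) - 1 = ((ys.length : Nat) : Int) := by push_cast; ring
      have hdec : pvDecToInt (PySem.List.pyGetD ([c] :: (pvVs (pvDigitVal c) ys).map PySem.Int.toChars)
          ((ys.length : Nat) : Int) ([] : List Char)) = pvBitAfter (pvDigitVal c) ys := by
        rcases List.eq_nil_or_concat ys with h | ⟨zs, z, h⟩
        · subst h
          rw [PySem.List.pyGetD_natCast]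
          simp only [pvVs, List.map_nil]
          simp [pvBitAfter, pvDecToInt]
        · subst h
          rw [PySem.List.pyGetD_natCast]
          simp only [List.concat_eq_append] at hba ⊢
          rw [pvVs_append, List.map_append]
          simp only [List.map_cons, List.map_nil]
          have hl : (([c] :: (pvVs (pvDigitVal c) zs).map PySem.Int.toChars)).length = (zs ++ [z]).length := by
            simp [pvVs_length]
          have hpref : (([c] :: (pvVs (pvDigitVal c) zs).map PySem.Int.toChars) ++
              [PySem.Int.toChars (pvNb (pvBitAfter (pvDigitVal c) zs) z)]).getD (zs ++ [z]).length []
              = PySem.Int.toChars (pvNb (pvBitAfter (pvDigitVal c) zs) z) := by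
            rw [← hl]
            simp [List.getD_eq_getElem?_getD]
          rw [show ([c] :: ((pvVs (pvDigitVal c) zs).map PySem.Int.toChars ++
                [PySem.Int.toChars (pvNb (pvBitAfter (pvDigitVal c) zs) z)]))
              = (([c] :: (pvVs (pvDigitVal c) zs).map PySem.Int.toChars) ++
                [PySem.Int.toChars (pvNb (pvBitAfter (pvDigitVal c) zs) z)]) by simp,
            hpref, pvBitAfter_append]
          exact pvDecToInt_bit _ (by rwa [pvBitAfter_append] at hba)
      show pvAStep (c :: (ys ++ [y])) ([c] :: (pvVs (pvDigitVal c) ys).map PySem.Int.toChars)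
          ((ys.length + 1 : Nat) : Int) = _
      unfold pvAStep
      rw [hgray, hidx, hdec, pvVs_append, List.map_append]
      by_cases hs : pvDigitVal y + pvBitAfter (pvDigitVal c) ys = 2
      · rw [if_pos hs]
        rw [show pvNb (pvBitAfter (pvDigitVal c) ys) y = 0 by unfold pvNb; rw [if_pos hs]]
        simp [show PySem.Int.toChars 0 = ['0'] from by decide]
      · rw [if_neg hs]
        rw [show pvNb (pvBitAfter (pvDigitVal c) ys) y = pvDigitVal y + pvBitAfter (pvDigitVal c) ys
            by unfold pvNb; rw [if_neg hs]]
        simp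

-- ---- A's second/third loops: powers-of-two sum = Horner ----
def pvHorner (a : Int) (cs : List Char) : Int := cs.foldl (fun d c => 2 * d + pvDigitVal c) a

theorem pvHorner_scale (x : Int) (t : List Char) :
    pvHorner x t = x * 2 ^ t.length + pvHorner 0 t := by
  induction t generalizing x with
  | nil => simp [pvHorner]
  | cons c t ih =>
      show pvHorner (2 * x + pvDigitVal c) t = _
      rw [show pvHorner 0 (c :: t) = pvHorner (2 * 0 + pvDigitVal c) t from rfl,
        ih, ih (2 * 0 + pvDigitVal c), List.length_cons, pow_succ]
      ring

theorem pvPowsum (cs : List Char) (a : Int) :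
    (cs.foldl (fun (st : Int × Int) c => (st.1 + 2 ^ st.2.toNat * pvDigitVal c, st.2 - 1))
        (a, (cs.length : Int) - 1)).1 = a + pvHorner 0 cs := by
  induction cs generalizing a with
  | nil => simp [pvHorner]
  | cons c t ih =>
      have h1 : (((c :: t).length : Int) - 1) = (t.length : Int) := by
        simp [List.length_cons]
      show (t.foldl _ (a + 2 ^ ((((c :: t).length : Int) - 1)).toNat * pvDigitVal c,
            (((c :: t).length : Int) - 1) - 1)).1 = _
      rw [h1, Int.toNat_natCast, ih]
      rw [show pvHorner 0 (c :: t) = pvHorner (2 * 0 + pvDigitVal c) t from rfl,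
        pvHorner_scale (2 * 0 + pvDigitVal c) t]
      ring

theorem pvFoldlAppend (l : List (List Char)) (acc : List Char) :
    l.foldl (fun s t => s ++ t) acc = acc ++ l.flatten := by
  induction l generalizing acc with
  | nil => simp
  | cons x t ih => simp [ih]

theorem pvHorner_append (a : Int) (xs ys : List Char) :
    pvHorner a (xs ++ ys) = pvHorner (pvHorner a xs) ys := by
  simp [pvHorner, List.foldl_append]

-- ---- B's fold = Horner over the same rendered digit stream (bits only) ----
theorem pvB_fold (rest : List Char) (bit dec : Int)
    (hb : bit = 0 ∨ bit = 1) (hrest : ∀ g ∈ rest, g = '0' ∨ g = '1') :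
    (rest.foldl
      (fun (st : Int × Int) g =>
        let s := pvDigitVal g + st.1
        let bit := if s = 2 then 0 else s
        (bit, 2 * st.2 + bit))
      (bit, dec)).2
      = pvHorner dec ((pvVs bit rest).map PySem.Int.toChars).flatten := by
  induction rest generalizing bit dec with
  | nil => simp [pvVs, pvHorner]
  | cons g t ih =>
      have hnb := pvNb_bit bit g hb (hrest g (by simp))
      have ht : ∀ x ∈ t, x = '0' ∨ x = '1' := fun x hx => hrest x (by simp [hx])
      show (t.foldl _ (pvNb bit g, 2 * dec + pvNb bit g)).2 = _
      rw [ih (pvNb bit g) (2 * dec + pvNb bit g) hnb ht]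
      have : pvHorner dec (PySem.Int.toChars (pvNb bit g)) = 2 * dec + pvNb bit g := by
        rcases hnb with h | h
        · rw [h, show PySem.Int.toChars (0 : Int) = ['0'] from by decide]
          norm_num [pvHorner, pvDigitVal]
          decide
        · rw [h, show PySem.Int.toChars (1 : Int) = ['1'] from by decide]
          norm_num [pvHorner, pvDigitVal]
          decide
      simp [pvVs, pvHorner_append, this]

-- ===== VERDICT (by name: the statement is the Claim_ definition above) =====
theorem gray_code_to_dec_changer_spec : Claim_equal_gray_code_to_dec_changer := by
  intro gray_num _hdom hpre
  obtain ⟨hne, hall⟩ := hpre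
  have hdig : ∀ c ∈ gray_num.toList, c = '0' ∨ c = '1' := by
    intro c hc
    have := List.all_eq_true.mp hall c hc
    simpa using this
  unfold Spec_gray_code_to_dec_changer
  cases hl : gray_num.toList with
  | nil => exact absurd hl hne
  | cons c rest =>
    have hc : c = '0' ∨ c = '1' := hdig c (by rw [hl]; simp)
    have hrest : ∀ g ∈ rest, g = '0' ∨ g = '1' :=
      fun g hg => hdig g (by rw [hl]; simp [hg])
    simp only [gray_code_to_dec_changer, gray_code_to_dec_changer_alt, bin_to_dec_changer,
      hl, PySem.List.len_eq]
    rw [PySem.List.pyGetD_zero_cons,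
      pvA_array rest c hc hrest, pvFoldlAppend,
      pvB_fold rest (pvDigitVal c) (pvDigitVal c)
        (by rcases hc with h | h <;> subst h <;> simp [pvDigitVal]) hrest]
    simp only [List.nil_append, List.flatten_cons]
    rw [pvPowsum, pvHorner_append, zero_add,
      show pvHorner 0 [c] = pvDigitVal c by simp [pvHorner]]
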